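-- pv_equiv track=rewrite | github.com/aidengindin/advent_of_code_2024 | day23/part1.py | matching_cliques
-- ===== SOURCE A (Python) =====
-- def connected(computer1, computer2, connections):
--     return (computer1, computer2) in connections or (computer2, computer1) in connections
--
-- def sorted(l):
--     l.sort()
--     return l
--
-- def matching_cliques(computers, connections):
--     result = set()
--     for connection in connections:
--         a, b = connection
--         a_connected = {c for c in computers if connected(a, c, connections)}
--         b_connected = {c for c in computers if connected(b, c, connections)}
--         result.update({tuple(sorted([a, b, c])) for c in a_connected.intersection(b_connected) if any(name[0] == "t" for name in [a, b, c])})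
--     return len(result)
-- ===== SOURCE B (Python) =====
-- def matching_cliques(computers, connections):
--     adj = {}
--     for a, b in connections:
--         adj.setdefault(a, set()).add(b)
--         adj.setdefault(b, set()).add(a)
--     cset = set(computers)
--     triangles = set()
--     for a, b in connections:
--         for c in adj.get(a, set()) & adj.get(b, set()):
--             if c in cset and (a.startswith("t") or b.startswith("t") or c.startswith("t")):
--                 triangles.add(tuple(sorted([a, b, c])))
--     return len(triangles)
-- ===== Notes on version B (the rewrite author's own statement) =====
-- stated objective: faster
-- what changed: B precomputes a symmetric adjacency dict-of-sets and the computer set once, then per edge intersects the two neighbor sets, instead of A's per-edge double scan of all computers with a linear search of the whole connection list inside each membership test.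
import Mathlib
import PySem

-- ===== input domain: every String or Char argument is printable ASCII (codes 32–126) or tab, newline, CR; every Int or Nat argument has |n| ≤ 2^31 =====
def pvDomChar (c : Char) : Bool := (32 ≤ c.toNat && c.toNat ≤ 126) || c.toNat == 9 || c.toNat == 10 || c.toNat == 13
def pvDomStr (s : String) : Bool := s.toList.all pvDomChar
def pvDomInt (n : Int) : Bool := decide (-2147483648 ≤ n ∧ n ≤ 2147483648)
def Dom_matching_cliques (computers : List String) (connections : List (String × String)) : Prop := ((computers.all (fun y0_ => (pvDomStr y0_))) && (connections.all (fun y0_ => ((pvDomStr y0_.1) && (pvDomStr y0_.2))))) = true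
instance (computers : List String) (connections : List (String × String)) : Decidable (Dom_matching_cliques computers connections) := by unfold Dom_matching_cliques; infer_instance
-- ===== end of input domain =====

-- B replaces A's per-edge scans of all computers (each with a linear search of the
-- whole connection list) by a precomputed adjacency dict of neighbor sets intersected per edge.

-- shared helper: tuple(sorted([a, b, c]))  (sorted of a 3-element list always has 3 elements,
-- so the catch-all branch is unreachable)
def tripleOf (a b c : String) : String × String × String :=
  match PySem.List.sorted [a, b, c] (fun x => x) false with
  | [x, y, z] => (x, y, z)
  | _ => ("", "", "")

-- ===== PORT A =====
-- connected(computer1, computer2, connections)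
def connectedP (computer1 computer2 : String) (connections : List (String × String)) : Bool :=
  connections.contains (computer1, computer2) || connections.contains (computer2, computer1)

-- any(name[0] == "t" for name in [a, b, c]); name[0] on "" raises IndexError in Python
-- (those inputs are outside Pre_), here the none branch returns false
def pyAnyT (a b c : String) : Bool :=
  [a, b, c].any (fun name =>
    match PySem.Str.pyGet? name 0 with
    | some ch => ch == 't'
    | none => false)

def matching_cliques (computers : List String) (connections : List (String × String)) : Int :=
  let result : PySem.Set (String × String × String) :=
    connections.foldl (fun result connection =>
      let a := connection.1
      let b := connection.2
      let a_connected : PySem.Set String :=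
        PySem.Set.ofList (computers.filter (fun c => connectedP a c connections))
      let b_connected : PySem.Set String :=
        PySem.Set.ofList (computers.filter (fun c => connectedP b c connections))
      PySem.Set.update result
        (PySem.Set.ofList
          (((PySem.Set.inter a_connected b_connected).filter (fun c => pyAnyT a b c)).map
            (fun c => tripleOf a b c))))
      PySem.Set.empty
  (PySem.Set.len result : Int)

-- ===== PORT B =====
def matching_cliques_alt (computers : List String) (connections : List (String × String)) : Int :=
  let adj : PySem.Dict String (PySem.Set String) :=
    connections.foldl (fun adj p =>
      let adj := adj.modify p.1 PySem.Set.empty (fun s => s.add p.2)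
      adj.modify p.2 PySem.Set.empty (fun s => s.add p.1)) PySem.Dict.empty
  let cset : PySem.Set String := PySem.Set.ofList computers
  let triangles : PySem.Set (String × String × String) :=
    connections.foldl (fun tri p =>
      (PySem.Set.inter (adj.getD p.1 PySem.Set.empty) (adj.getD p.2 PySem.Set.empty)).foldl
        (fun tri c =>
          if PySem.Set.contains cset c &&
              (PySem.Str.startswith p.1 "t" || PySem.Str.startswith p.2 "t" ||
                PySem.Str.startswith c "t") then
            PySem.Set.add tri (tripleOf p.1 p.2 c)
          else tri) tri)
      PySem.Set.empty
  (PySem.Set.len triangles : Int)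

-- ===== PRECONDITION & SPEC =====
-- Pre_ excludes exactly the inputs on which A raises IndexError: those where some candidate
-- triangle (an edge (a,b) plus a computer c connected to both) makes A's any(name[0] == "t")
-- scan reach an empty name before a name starting with "t".
def Pre_matching_cliques (computers : List String) (connections : List (String × String)) : Prop :=
  ∀ p ∈ connections, ∀ c ∈ computers,
    (((p.1, c) ∈ connections ∨ (c, p.1) ∈ connections) ∧
      ((p.2, c) ∈ connections ∨ (c, p.2) ∈ connections)) →
    (p.1 ≠ "" ∧
      (PySem.Str.startswith p.1 "t" = true ∨ p.2 ≠ "") ∧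
      (PySem.Str.startswith p.1 "t" = true ∨ PySem.Str.startswith p.2 "t" = true ∨ c ≠ ""))

instance (computers : List String) (connections : List (String × String)) : Decidable (Pre_matching_cliques computers connections) := by unfold Pre_matching_cliques; infer_instance

def pvWitness_matching_cliques : List String × (List (String × String)) :=
  (["ta", "b", "c"], [("ta", "b"), ("b", "c"), ("c", "ta")])

def Spec_matching_cliques (computers : List String) (connections : List (String × String)) (out : Int) : Prop := out = matching_cliques_alt computers connections
instance (computers : List String) (connections : List (String × String)) (out : Int) : Decidable (Spec_matching_cliques computers connections out) := by unfold Spec_matching_cliques; infer_instance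

-- ===== CLAIM (what is proved, stated in full; the proofs are below) =====
def Claim_equal_matching_cliques : Prop := ∀ (computers : List String) (connections : List (String × String)), Dom_matching_cliques computers connections → Pre_matching_cliques computers connections → Spec_matching_cliques computers connections (matching_cliques computers connections)


-- ===== LEMMAS AND PROOFS =====


-- ---- the t-condition: A's name[0] == "t" term agrees with B's startswith (both are false on "") ----
theorem firstT_eq (s : String) :
    (match PySem.Str.pyGet? s 0 with | some ch => ch == 't' | none => false)
      = PySem.Str.startswith s "t" := by
  cases h : s.toList with
  | nil =>
    simp [PySem.Str.pyGet?, PySem.Str.startswith, PySem.Chars.startswith, h,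
      PySem.List.pyGet?, PySem.List.pyIdx?]
  | cons ch tl =>
    simp [PySem.Str.pyGet?, PySem.Str.startswith, PySem.Chars.startswith, h,
      List.isPrefixOf, BEq.comm]

theorem pyAnyT_eq (a b c : String) :
    pyAnyT a b c =
      (PySem.Str.startswith a "t" || PySem.Str.startswith b "t" || PySem.Str.startswith c "t") := by
  simp only [pyAnyT, List.any_cons, List.any_nil, Bool.or_false]
  rw [firstT_eq a, firstT_eq b, firstT_eq c, Bool.or_assoc]

-- ---- connected() as list membership ----
theorem connectedP_iff (a c : String) (conns : List (String × String)) :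
    connectedP a c conns = true ↔ ((a, c) ∈ conns ∨ (c, a) ∈ conns) := by
  simp [connectedP]

-- ---- adjacency built by B's first loop: c ∈ adj[a] ↔ the edge occurs in either direction ----
theorem adj_mem (conns : List (String × String))
    (adj0 : PySem.Dict String (PySem.Set String)) (a c : String) :
    c ∈ (conns.foldl (fun adj p =>
        (adj.modify p.1 PySem.Set.empty (fun s => s.add p.2)).modify p.2 PySem.Set.empty
          (fun s => s.add p.1)) adj0).getD a PySem.Set.empty ↔
      c ∈ adj0.getD a PySem.Set.empty ∨ (a, c) ∈ conns ∨ (c, a) ∈ conns := by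
  induction conns generalizing adj0 with
  | nil => simp
  | cons p tl ih =>
    obtain ⟨x, y⟩ := p
    simp only [List.foldl_cons, ih, List.mem_cons, Prod.mk.injEq]
    simp [PySem.Dict.getD_modify]
    split_ifs <;> simp_all <;> tauto

-- ---- membership in A's accumulated result set ----
theorem A_mem (computers : List String) (conns conns2 : List (String × String))
    (t0 : PySem.Set (String × String × String)) (x : String × String × String) :
    x ∈ conns2.foldl (fun result connection =>
        PySem.Set.update result
          (PySem.Set.ofList
            (((PySem.Set.inter
                  (PySem.Set.ofList (computers.filter (fun c => connectedP connection.1 c conns)))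
                  (PySem.Set.ofList (computers.filter (fun c => connectedP connection.2 c conns)))).filter
                (fun c => pyAnyT connection.1 connection.2 c)).map
              (fun c => tripleOf connection.1 connection.2 c)))) t0 ↔
      x ∈ t0 ∨ ∃ p ∈ conns2, ∃ c,
        (c ∈ computers ∧ connectedP p.1 c conns = true) ∧
        (c ∈ computers ∧ connectedP p.2 c conns = true) ∧
        pyAnyT p.1 p.2 c = true ∧ x = tripleOf p.1 p.2 c := by
  induction conns2 generalizing t0 with
  | nil => simp
  | cons p tl ih =>
    simp only [List.foldl_cons, ih, PySem.Set.mem_update, PySem.Set.mem_ofList, List.mem_map,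
      List.mem_filter, PySem.Set.mem_inter, List.mem_cons]
    aesop

-- ---- membership in B's inner loop over the intersection ----
theorem B_inner_mem (cset : PySem.Set String) (a b : String) (l : List String)
    (t0 : PySem.Set (String × String × String)) (x : String × String × String) :
    x ∈ l.foldl (fun tri c =>
        if PySem.Set.contains cset c &&
            (PySem.Str.startswith a "t" || PySem.Str.startswith b "t" ||
              PySem.Str.startswith c "t") then
          PySem.Set.add tri (tripleOf a b c)
        else tri) t0 ↔
      x ∈ t0 ∨ ∃ c ∈ l,
        (PySem.Set.contains cset c &&
          (PySem.Str.startswith a "t" || PySem.Str.startswith b "t" ||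
            PySem.Str.startswith c "t")) = true ∧ x = tripleOf a b c := by
  induction l generalizing t0 with
  | nil => simp
  | cons h tl ih =>
    simp only [List.foldl_cons, ih, List.mem_cons]
    by_cases hcond : (PySem.Set.contains cset h &&
        (PySem.Str.startswith a "t" || PySem.Str.startswith b "t" ||
          PySem.Str.startswith h "t")) = true
    · simp only [hcond, if_true, PySem.Set.mem_add]
      aesop
    · simp only [hcond, if_false, Bool.false_eq_true]
      aesop


-- ---- membership in B's triangle set ----
theorem B_mem (adj : PySem.Dict String (PySem.Set String))
    (cset : PySem.Set String) (conns2 : List (String × String))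
    (t0 : PySem.Set (String × String × String)) (x : String × String × String) :
    x ∈ conns2.foldl (fun tri p =>
        (PySem.Set.inter (adj.getD p.1 PySem.Set.empty) (adj.getD p.2 PySem.Set.empty)).foldl
          (fun tri c =>
            if PySem.Set.contains cset c &&
                (PySem.Str.startswith p.1 "t" || PySem.Str.startswith p.2 "t" ||
                  PySem.Str.startswith c "t") then
              PySem.Set.add tri (tripleOf p.1 p.2 c)
            else tri) tri) t0 ↔
      x ∈ t0 ∨ ∃ p ∈ conns2, ∃ c,
        c ∈ PySem.Set.inter (adj.getD p.1 PySem.Set.empty) (adj.getD p.2 PySem.Set.empty) ∧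
        (PySem.Set.contains cset c &&
          (PySem.Str.startswith p.1 "t" || PySem.Str.startswith p.2 "t" ||
            PySem.Str.startswith c "t")) = true ∧ x = tripleOf p.1 p.2 c := by
  induction conns2 generalizing t0 with
  | nil => simp
  | cons p tl ih =>
    simp only [List.foldl_cons, ih, B_inner_mem, List.mem_cons]
    aesop

-- ---- both accumulated sets are duplicate-free ----
theorem A_nodup (computers : List String) (conns conns2 : List (String × String))
    (t0 : PySem.Set (String × String × String)) (h : t0.Nodup) :
    (conns2.foldl (fun result connection =>
        PySem.Set.update result
          (PySem.Set.ofList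
            (((PySem.Set.inter
                  (PySem.Set.ofList (computers.filter (fun c => connectedP connection.1 c conns)))
                  (PySem.Set.ofList (computers.filter (fun c => connectedP connection.2 c conns)))).filter
                (fun c => pyAnyT connection.1 connection.2 c)).map
              (fun c => tripleOf connection.1 connection.2 c)))) t0).Nodup := by
  induction conns2 generalizing t0 with
  | nil => exact h
  | cons p tl ih => exact ih _ (PySem.Set.nodup_update _ _ h)

theorem B_inner_nodup (cset : PySem.Set String) (a b : String) (l : List String)
    (t0 : PySem.Set (String × String × String)) (h : t0.Nodup) :
    (l.foldl (fun tri c =>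
        if PySem.Set.contains cset c &&
            (PySem.Str.startswith a "t" || PySem.Str.startswith b "t" ||
              PySem.Str.startswith c "t") then
          PySem.Set.add tri (tripleOf a b c)
        else tri) t0).Nodup := by
  induction l generalizing t0 with
  | nil => exact h
  | cons c tl ih =>
    simp only [List.foldl_cons]
    split
    · exact ih _ (PySem.Set.nodup_add _ _ h)
    · exact ih _ h

theorem B_nodup (adj : PySem.Dict String (PySem.Set String)) (cset : PySem.Set String)
    (conns2 : List (String × String))
    (t0 : PySem.Set (String × String × String)) (h : t0.Nodup) :
    (conns2.foldl (fun tri p =>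
        (PySem.Set.inter (adj.getD p.1 PySem.Set.empty) (adj.getD p.2 PySem.Set.empty)).foldl
          (fun tri c =>
            if PySem.Set.contains cset c &&
                (PySem.Str.startswith p.1 "t" || PySem.Str.startswith p.2 "t" ||
                  PySem.Str.startswith c "t") then
              PySem.Set.add tri (tripleOf p.1 p.2 c)
            else tri) tri) t0).Nodup := by
  induction conns2 generalizing t0 with
  | nil => exact h
  | cons p tl ih => exact ih _ (B_inner_nodup _ _ _ _ _ h)

-- ---- the heart of the claim ----
theorem main_eq (computers : List String) (connections : List (String × String)) :
    matching_cliques computers connections = matching_cliques_alt computers connections := by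
  unfold matching_cliques matching_cliques_alt
  simp only [PySem.Set.len, Int.natCast_inj]
  apply List.Perm.length_eq
  rw [List.perm_ext_iff_of_nodup
    (A_nodup computers connections connections PySem.Set.empty (by simp [PySem.Set.empty]))
    (B_nodup _ _ connections PySem.Set.empty (by simp [PySem.Set.empty]))]
  intro y
  have hempty : ∀ {α : Type} (z : α), z ∈ (PySem.Set.empty : PySem.Set α) ↔ False := by
    simp [PySem.Set.empty]
  rw [A_mem, B_mem, hempty, false_or, false_or]
  constructor
  · rintro ⟨p, hp, c, ⟨hc1, hcn1⟩, ⟨hc2, hcn2⟩, ht, hy⟩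
    refine ⟨p, hp, c, ?_, ?_, hy⟩
    · rw [PySem.Set.mem_inter]
      constructor <;> rw [adj_mem, PySem.Dict.getD_empty, hempty, false_or]
      · exact (connectedP_iff _ _ _).mp hcn1
      · exact (connectedP_iff _ _ _).mp hcn2
    · rw [Bool.and_eq_true]
      refine ⟨(PySem.Set.contains_iff _ _).mpr ((PySem.Set.mem_ofList _ _).mpr hc1), ?_⟩
      rw [← pyAnyT_eq p.1 p.2 c]
      exact ht
  · rintro ⟨p, hp, c, hcint, hcond, hy⟩
    rw [PySem.Set.mem_inter] at hcint
    obtain ⟨h1, h2⟩ := hcint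
    rw [adj_mem, PySem.Dict.getD_empty, hempty, false_or] at h1
    rw [adj_mem, PySem.Dict.getD_empty, hempty, false_or] at h2
    rw [Bool.and_eq_true] at hcond
    obtain ⟨hcs, hts⟩ := hcond
    have hcmem : c ∈ computers := (PySem.Set.mem_ofList _ _).mp ((PySem.Set.contains_iff _ _).mp hcs)
    refine ⟨p, hp, c, ⟨hcmem, (connectedP_iff _ _ _).mpr h1⟩,
      ⟨hcmem, (connectedP_iff _ _ _).mpr h2⟩, ?_, hy⟩
    rw [pyAnyT_eq p.1 p.2 c]
    exact hts

-- ===== VERDICT (by name: the statement is the Claim_ definition above) =====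
theorem matching_cliques_spec : Claim_equal_matching_cliques := by
  intro computers connections _ _
  exact main_eq computers connections
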